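-- pv_equiv track=rewrite | github.com/davidcantidio/test-tdd-project | streamlit_extension/utils/cache.py | _validate_cache_key_for_filesystem
-- ===== SOURCE A (Python) =====
-- def _validate_cache_key_for_filesystem(cache_key: str) -> bool:
--     """
--     Validate that cache key is safe for filesystem usage.
--
--     Args:
--         cache_key: The cache key to validate
--
--     Returns:
--         True if safe, False if potentially dangerous
--     """
--     # Cache keys should be SHA-256 hashes (64 hexadecimal characters)
--     # This is additional validation since _generate_key now always hashes
--
--     if not cache_key:
--         return False
--
--     # Should be exactly 64 characters (SHA-256 hex)
--     if len(cache_key) != 64: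
--         return False
--
--     # Should only contain hexadecimal characters (0-9, a-f)
--     if not all(c in '0123456789abcdef' for c in cache_key.lower()):
--         return False
--
--     # Additional checks for dangerous patterns (defense in depth)
--     dangerous_patterns = [
--         '..', '/', '\\', ':', '*', '?', '"', '<', '>', '|',
--         'CON', 'PRN', 'AUX', 'NUL',  # Windows reserved names
--         'com1', 'com2', 'com3', 'com4', 'com5', 'com6', 'com7', 'com8', 'com9',
--         'lpt1', 'lpt2', 'lpt3', 'lpt4', 'lpt5', 'lpt6', 'lpt7', 'lpt8', 'lpt9'
--     ]
--
--     cache_key_lower = cache_key.lower()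
--     for pattern in dangerous_patterns:
--         if pattern.lower() in cache_key_lower:
--             return False
--
--     return True
-- ===== SOURCE B (Python) =====
-- import re
--
-- def _validate_cache_key_for_filesystem(cache_key: str) -> bool:
--     # One declarative pass: a valid key is exactly 64 lowercase-hex characters.
--     # (The original's dangerous-pattern scan is dead: every pattern contains a
--     # non-hex character, so it can never match a 64-char all-hex string.)
--     return re.fullmatch(r'[0-9a-f]{64}', cache_key.lower()) is not None
-- ===== Notes on version B (the rewrite author's own statement) =====
-- stated objective: idiomatic
-- what changed: Replaces the four sequential guards (emptiness, length, per-char hex membership, and a 37-pattern substring scan) with a single regex fullmatch of [0-9a-f]{64} on the lowercased key; the pattern scan is provably dead because every dangerous pattern contains a non-hex character.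
import Mathlib
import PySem

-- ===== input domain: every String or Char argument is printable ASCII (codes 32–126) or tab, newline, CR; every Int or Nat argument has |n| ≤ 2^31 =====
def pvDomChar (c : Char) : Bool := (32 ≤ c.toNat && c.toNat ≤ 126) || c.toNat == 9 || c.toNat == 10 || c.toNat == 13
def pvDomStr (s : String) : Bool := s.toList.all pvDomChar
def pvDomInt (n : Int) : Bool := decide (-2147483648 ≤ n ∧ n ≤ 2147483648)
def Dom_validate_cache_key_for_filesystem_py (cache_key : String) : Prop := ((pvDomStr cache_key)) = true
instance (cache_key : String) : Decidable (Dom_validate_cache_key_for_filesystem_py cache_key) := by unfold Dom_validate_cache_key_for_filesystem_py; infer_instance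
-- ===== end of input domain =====

-- B replaces A's four sequential guards (emptiness, length, hex membership, 37-pattern substring scan)
-- with a single check "64 lowercase-hex characters" (a regex fullmatch in Python); return value only.

-- ===== PORT A =====
def pvHex : List Char := "0123456789abcdef".toList

def pvDangerousPatterns : List String :=
  ["..", "/", "\\", ":", "*", "?", "\"", "<", ">", "|",
   "CON", "PRN", "AUX", "NUL",
   "com1", "com2", "com3", "com4", "com5", "com6", "com7", "com8", "com9",
   "lpt1", "lpt2", "lpt3", "lpt4", "lpt5", "lpt6", "lpt7", "lpt8", "lpt9"]

-- the 'for pattern in dangerous_patterns: if pattern.lower() in cache_key_lower: return False' loop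
def pvPatternLoop : List String → List Char → Bool
  | [], _ => true
  | p :: rest, lk =>
      if PySem.Chars.isIn (PySem.Chars.lower p.toList) lk then false
      else pvPatternLoop rest lk

def validate_cache_key_for_filesystem_py (cache_key : String) : Bool :=
  if cache_key.toList = [] then false
  else if PySem.Str.len cache_key ≠ 64 then false
  else if ¬ ((PySem.Chars.lower cache_key.toList).all
                (fun c => PySem.Chars.isIn [c] pvHex)) then false
  else pvPatternLoop pvDangerousPatterns (PySem.Chars.lower cache_key.toList)

-- ===== PORT B =====
-- re.fullmatch(r'[0-9a-f]{64}', cache_key.lower()): exactly 64 characters, each in the class [0-9a-f]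
def validate_cache_key_for_filesystem_py_alt (cache_key : String) : Bool :=
  let s := PySem.Chars.lower cache_key.toList
  s.length == 64 && s.all (fun c => "0123456789abcdef".toList.contains c)

-- ===== PRECONDITION & SPEC =====
def Spec_validate_cache_key_for_filesystem_py (cache_key : String) (out : Bool) : Prop := out = validate_cache_key_for_filesystem_py_alt cache_key
instance (cache_key : String) (out : Bool) : Decidable (Spec_validate_cache_key_for_filesystem_py cache_key out) := by unfold Spec_validate_cache_key_for_filesystem_py; infer_instance

-- ===== CLAIM (what is proved, stated in full; the proofs are below) =====
def Claim_equal_validate_cache_key_for_filesystem_py : Prop := ∀ (cache_key : String), Dom_validate_cache_key_for_filesystem_py cache_key → Spec_validate_cache_key_for_filesystem_py cache_key (validate_cache_key_for_filesystem_py cache_key)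

-- ===== LEMMAS AND PROOFS =====

theorem pv_isIn_singleton (c : Char) (l : List Char) :
    PySem.Chars.isIn [c] l = l.contains c := by
  by_cases h : c ∈ l
  · have h1 : PySem.Chars.isIn [c] l = true := by
      refine (PySem.Chars.isIn_iff_infix [c] l).mpr ?_
      obtain ⟨pre, suf, rfl⟩ := List.append_of_mem h
      exact ⟨pre, suf, by simp⟩
    simp [h1, h]
  · have h1 : PySem.Chars.isIn [c] l = false := by
      refine (PySem.Chars.isIn_eq_false_iff [c] l).mpr ?_
      intro hinf
      exact h (hinf.sublist.mem (by simp))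
    simp [h1, h]

theorem pv_lower_length (s : List Char) :
    (PySem.Chars.lower s).length = s.length := by
  simp [PySem.Chars.lower]

theorem pv_all_eq (lk : List Char) :
    (lk.all (fun c => PySem.Chars.isIn [c] pvHex))
      = lk.all (fun c => pvHex.contains c) := by
  simp only [pv_isIn_singleton]

theorem pv_notIn_of_all_hex (sub lk : List Char) (c : Char)
    (hc : c ∈ sub) (hnot : pvHex.contains c = false)
    (hall : lk.all (fun d => pvHex.contains d) = true) :
    PySem.Chars.isIn sub lk = false := by
  refine (PySem.Chars.isIn_eq_false_iff sub lk).mpr ?_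
  intro hinf
  have hmem : c ∈ lk := hinf.sublist.mem hc
  have h2 := List.all_eq_true.mp hall c hmem
  rw [hnot] at h2
  exact Bool.false_ne_true h2

theorem pv_loop_true (ps : List String) (lk : List Char)
    (h : ∀ p ∈ ps, PySem.Chars.isIn (PySem.Chars.lower p.toList) lk = false) :
    pvPatternLoop ps lk = true := by
  induction ps with
  | nil => rfl
  | cons p rest ih =>
      simp only [pvPatternLoop, h p (by simp), if_false, Bool.false_eq_true]
      exact ih fun q hq => h q (by simp [hq])

set_option maxRecDepth 4000 in
theorem pv_patterns_bool :
    pvDangerousPatterns.all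
      (fun p => (PySem.Chars.lower p.toList).any fun c => !pvHex.contains c) = true := by
  decide

theorem pv_patterns_have_nonhex :
    ∀ p ∈ pvDangerousPatterns, ∃ c ∈ PySem.Chars.lower p.toList,
      pvHex.contains c = false := by
  intro p hp
  have h1 := List.all_eq_true.mp pv_patterns_bool p hp
  obtain ⟨c, hc, h2⟩ := List.any_eq_true.mp h1
  exact ⟨c, hc, by simpa using h2⟩

theorem pv_loop_of_hex (lk : List Char)
    (hall : lk.all (fun d => pvHex.contains d) = true) :
    pvPatternLoop pvDangerousPatterns lk = true := by
  apply pv_loop_true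
  intro p hp
  obtain ⟨c, hc, hnot⟩ := pv_patterns_have_nonhex p hp
  exact pv_notIn_of_all_hex _ _ c hc hnot hall

-- ===== VERDICT (by name: the statement is the Claim_ definition above) =====
theorem validate_cache_key_for_filesystem_py_spec : Claim_equal_validate_cache_key_for_filesystem_py := by
  intro cache_key _
  unfold Spec_validate_cache_key_for_filesystem_py
  unfold validate_cache_key_for_filesystem_py validate_cache_key_for_filesystem_py_alt
  simp only [show ("0123456789abcdef".toList) = pvHex from rfl]
  rw [pv_all_eq]
  by_cases hlen : cache_key.toList.length = 64
  · have hne : cache_key.toList ≠ [] := fun h => by rw [h] at hlen; simp at hlen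
    have hlen' : PySem.Str.len cache_key = 64 := by rw [PySem.Str.len_eq, hlen]; rfl
    have hB : ((PySem.Chars.lower cache_key.toList).length == 64) = true := by
      rw [pv_lower_length, hlen]; decide
    rw [if_neg hne, if_neg (fun h => h hlen'), hB, Bool.true_and]
    by_cases hall : ((PySem.Chars.lower cache_key.toList).all fun c => pvHex.contains c) = true
    · rw [if_neg (not_not_intro hall), pv_loop_of_hex _ hall, hall]
    · rw [if_pos hall]
      rw [Bool.not_eq_true] at hall
      rw [hall]
  · have hlen' : PySem.Str.len cache_key ≠ 64 := by
      rw [PySem.Str.len_eq]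
      exact_mod_cast fun h => hlen (by exact_mod_cast h)
    have hB : ((PySem.Chars.lower cache_key.toList).length == 64) = false := by
      have hlen2 : cache_key.length ≠ 64 := by simpa using hlen
      rw [pv_lower_length]; simp [hlen2]
    by_cases hne : cache_key.toList = []
    · rw [if_pos hne, hB, Bool.false_and]
    · rw [if_neg hne, if_pos hlen', hB, Bool.false_and]
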